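-- pv_equiv track=rewrite | github.com/sunilsoni/interview-notes-python | com/interview/2024/May/findNumOfPairs.py | findNumOfPairs
-- ===== SOURCE A (Python) =====
-- def findNumOfPairs(a, b):
--     a.sort()
--     b.sort()
--     pairs = 0
--     j = 0
--     for i in range(len(a)):
--         while j < len(b) and a[i] >= b[j]:
--             j += 1
--         if j == len(b):
--             break
--         pairs += 1
--         j += 1
--     return pairs
-- ===== SOURCE B (Python) =====
-- def findNumOfPairs(a, b):
--     # Same in-place sorting side effect on a and b as the original.
--     a.sort()
--     b.sort()
--     # Pack each value with a tag in its low bit: b-events are even, a-events odd,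
--     # so at equal value a b-event sorts first and only strictly smaller a's can match it.
--     events = sorted([2 * y for y in b] + [2 * x + 1 for x in a])
--     avail = 0
--     pairs = 0
--     for e in events:
--         if e % 2 == 1:
--             avail += 1
--         elif avail > 0:
--             avail -= 1
--             pairs += 1
--     return pairs
-- ===== Notes on version B (the rewrite author's own statement) =====
-- stated objective: alternative
-- what changed: Replaces the nested two-pointer loop with break by a single sweep over one merged sorted event list (b-values tagged even, a-values tagged odd in the low bit) maintaining a counter of unmatched a's.
import Mathlib
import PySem

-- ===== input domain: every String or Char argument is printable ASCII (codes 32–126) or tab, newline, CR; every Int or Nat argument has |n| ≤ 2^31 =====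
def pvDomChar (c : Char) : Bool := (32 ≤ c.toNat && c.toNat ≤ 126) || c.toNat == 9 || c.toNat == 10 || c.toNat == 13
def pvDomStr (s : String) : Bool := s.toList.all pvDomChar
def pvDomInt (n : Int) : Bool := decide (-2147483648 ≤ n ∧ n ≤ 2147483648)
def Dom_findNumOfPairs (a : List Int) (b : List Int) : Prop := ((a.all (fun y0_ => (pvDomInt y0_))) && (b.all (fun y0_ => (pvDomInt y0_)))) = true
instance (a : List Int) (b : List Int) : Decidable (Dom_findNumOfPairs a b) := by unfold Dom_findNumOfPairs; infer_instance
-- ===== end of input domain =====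

-- B replaces A's nested two-pointer-with-break greedy by a single tagged-event sweep
-- (objective: alternative; equivalence is about the RETURN value — both Pythons also
-- sort a and b in place, which Lean does not model).

-- ===== PORT A =====
-- the inner `while j < len(b) and a[i] >= b[j]: j += 1`
def pvSkipJ (x : Int) (b : List Int) (j : Nat) : Nat :=
  if h : j < b.length then
    if b[j]'h ≤ x then pvSkipJ x b (j + 1) else j
  else j
termination_by b.length - j

-- the `for i in range(len(a))` loop with its break; `j` is reassigned to the while-loop's result
def pvLoopA (a b : List Int) (i j : Nat) (pairs : Int) : Int :=
  if h : i < a.length then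
    if pvSkipJ (a[i]'h) b j = b.length then pairs
    else pvLoopA a b (i + 1) (pvSkipJ (a[i]'h) b j + 1) (pairs + 1)
  else pairs
termination_by a.length - i

def findNumOfPairs (a : List Int) (b : List Int) : Int :=
  pvLoopA (PySem.List.sorted a (fun x => x)) (PySem.List.sorted b (fun x => x)) 0 0 0

-- ===== PORT B =====
-- the `for e in events` sweep over (avail, pairs)
def pvSweepStep (st : Int × Int) (e : Int) : Int × Int :=
  if PySem.Int.mod e 2 = 1 then (st.1 + 1, st.2)
  else if st.1 > 0 then (st.1 - 1, st.2 + 1)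
  else st

def findNumOfPairs_alt (a : List Int) (b : List Int) : Int :=
  let sa := PySem.List.sorted a (fun x => x)
  let sb := PySem.List.sorted b (fun x => x)
  let events := PySem.List.sorted (sb.map (fun y => 2 * y) ++ sa.map (fun x => 2 * x + 1)) (fun e => e)
  (events.foldl pvSweepStep (0, 0)).2

-- ===== PRECONDITION & SPEC =====
def Spec_findNumOfPairs (a : List Int) (b : List Int) (out : Int) : Prop := out = findNumOfPairs_alt a b
instance (a : List Int) (b : List Int) (out : Int) : Decidable (Spec_findNumOfPairs a b out) := by unfold Spec_findNumOfPairs; infer_instance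

-- ===== CLAIM (what is proved, stated in full; the proofs are below) =====
def Claim_equal_findNumOfPairs : Prop := ∀ (a : List Int) (b : List Int), Dom_findNumOfPairs a b → Spec_findNumOfPairs a b (findNumOfPairs a b)

-- ===== LEMMAS AND PROOFS =====

-- the common greedy matching both programs compute on the sorted lists
def pvMatch : List Int → List Int → Int
  | _, [] => 0
  | [], _ :: _ => 0
  | x :: xs, y :: ys => if x < y then 1 + pvMatch xs ys else pvMatch (x :: xs) ys

-- pair-free reformulation of the sweep's running state
def pvSweepP : List Int → Int → Int
  | [], _ => 0
  | e :: es, k =>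
      if PySem.Int.mod e 2 = 1 then pvSweepP es (k + 1)
      else if k > 0 then 1 + pvSweepP es (k - 1) else pvSweepP es k

theorem pvMatch_nil (sa : List Int) : pvMatch sa [] = 0 := by
  cases sa <;> rfl

-- ---- A-side: the two-pointer loop computes pvMatch ----

theorem pvMatch_nil_left (sb : List Int) : pvMatch [] sb = 0 := by
  cases sb <;> rfl

theorem pvSkipJ_spec (x : Int) (b : List Int) (j : Nat) (hj : j ≤ b.length) :
    (j ≤ pvSkipJ x b j ∧ pvSkipJ x b j ≤ b.length) ∧
      (∀ xs : List Int, pvMatch (x :: xs) (b.drop j) = pvMatch (x :: xs) (b.drop (pvSkipJ x b j))) ∧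
      (pvSkipJ x b j = b.length ∨
        ∃ h : pvSkipJ x b j < b.length, x < b[pvSkipJ x b j]'h) := by
  induction hn : b.length - j using Nat.strong_induction_on generalizing j with
  | _ n ih =>
    by_cases h : j < b.length
    · by_cases hle : b[j]'h ≤ x
      · have hstep : pvSkipJ x b j = pvSkipJ x b (j + 1) := by
          rw [pvSkipJ, dif_pos h, if_pos hle]
        have ihr := ih (b.length - (j + 1)) (by omega) (j + 1) (by omega) rfl
        rw [hstep]
        refine ⟨by have := ihr.1; omega, fun xs => ?_, ihr.2.2⟩
        rw [List.drop_eq_getElem_cons h]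
        simp only [pvMatch, if_neg (not_lt.mpr hle)]
        exact ihr.2.1 xs
      · have hstop : pvSkipJ x b j = j := by rw [pvSkipJ, dif_pos h, if_neg hle]
        rw [hstop]
        exact ⟨⟨le_refl j, hj⟩, fun xs => rfl, Or.inr ⟨h, lt_of_not_ge hle⟩⟩
    · have hstop : pvSkipJ x b j = j := by rw [pvSkipJ, dif_neg h]
      rw [hstop]
      exact ⟨⟨le_refl j, hj⟩, fun xs => rfl, Or.inl (by omega)⟩

theorem pvLoopA_spec (a b : List Int) (i j : Nat) (pairs : Int) (hj : j ≤ b.length) :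
    pvLoopA a b i j pairs = pairs + pvMatch (a.drop i) (b.drop j) := by
  induction hn : a.length - i using Nat.strong_induction_on generalizing i j pairs with
  | _ n ih =>
    by_cases h : i < a.length
    · obtain ⟨⟨hj1, hle⟩, hmm, hstop⟩ := pvSkipJ_spec (a[i]'h) b j hj
      by_cases hbreak : pvSkipJ (a[i]'h) b j = b.length
      · rw [pvLoopA, dif_pos h, if_pos hbreak]
        rw [List.drop_eq_getElem_cons h, hmm, hbreak, List.drop_length, pvMatch_nil]
        ring
      · rw [pvLoopA, dif_pos h, if_neg hbreak]
        rcases hstop with h1 | ⟨h1, hx⟩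
        · exact absurd h1 hbreak
        · rw [ih (a.length - (i + 1)) (by omega) (i + 1) _ (pairs + 1) (by omega) rfl]
          rw [List.drop_eq_getElem_cons h, hmm, List.drop_eq_getElem_cons h1]
          simp only [pvMatch, if_pos hx]
          ring
    · rw [pvLoopA, dif_neg h, List.drop_eq_nil_of_le (by omega), pvMatch_nil_left]
      ring

-- ---- B-side: the sweep over the sorted events computes pvMatch ----

theorem pvSorted_events_eq_merge (sa sb : List Int)
    (ha : sa.Pairwise (· ≤ ·)) (hb : sb.Pairwise (· ≤ ·)) :
    PySem.List.sorted (sb.map (fun y => 2 * y) ++ sa.map (fun x => 2 * x + 1)) (fun e => e) =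
      List.merge (sb.map (fun y => 2 * y)) (sa.map (fun x => 2 * x + 1)) := by
  have hmb : (sb.map (fun y => 2 * y)).Pairwise (· ≤ ·) :=
    List.Pairwise.map _ (fun h => by omega) hb
  have hma : (sa.map (fun x => 2 * x + 1)).Pairwise (· ≤ ·) :=
    List.Pairwise.map _ (fun h => by omega) ha
  apply List.Perm.eq_of_pairwise (le := (· ≤ ·)) (fun a b _ _ h1 h2 => le_antisymm h1 h2)
  · exact PySem.List.sorted_pairwise _ _
  · exact List.Pairwise.merge hmb hma
  · exact ((PySem.List.sorted_perm _ _ _).trans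
      (List.merge_perm_append _).symm).trans (List.Perm.refl _)

theorem pvFoldl_sweep (es : List Int) (k p : Int) :
    (es.foldl pvSweepStep (k, p)).2 = p + pvSweepP es k := by
  induction es generalizing k p with
  | nil => simp [pvSweepP]
  | cons e es ih =>
    simp only [List.foldl_cons, pvSweepStep, pvSweepP]
    split_ifs with h1 h2
    · rw [ih]
    · rw [ih]; ring
    · rw [ih]

theorem pvMod_two_even (y : Int) : PySem.Int.mod (2 * y) 2 = 0 := by
  rw [PySem.Int.mod_eq_emod_of_pos (by norm_num)]; omega

theorem pvMod_two_odd (x : Int) : PySem.Int.mod (2 * x + 1) 2 = 1 := by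
  rw [PySem.Int.mod_eq_emod_of_pos (by norm_num)]; omega

theorem pvSweepP_all_odd (sa : List Int) (k : Int) :
    pvSweepP (sa.map (fun x => 2 * x + 1)) k = 0 := by
  induction sa generalizing k with
  | nil => rfl
  | cons x xs ih => simp only [List.map_cons, pvSweepP, pvMod_two_odd, if_pos]; exact ih _

theorem pvSweepP_all_even (sb : List Int) (k : Int) (hk : 0 ≤ k) :
    pvSweepP (sb.map (fun y => 2 * y)) k = min k sb.length := by
  induction sb generalizing k with
  | nil => simp [pvSweepP]; omega
  | cons y ys ih =>
    simp only [List.map_cons, pvSweepP, pvMod_two_even]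
    rw [if_neg (by norm_num)]
    split_ifs with h
    · rw [ih _ (by omega)]; simp [List.length_cons]; omega
    · rw [ih _ hk]; simp [List.length_cons]; omega

-- the core sweep ↔ greedy correspondence; only sortedness of b is needed
theorem pvSweep_merge (sb : List Int) (hb : sb.Pairwise (· ≤ ·)) :
    ∀ (sa : List Int) (k : Int), 0 ≤ k →
      pvSweepP (List.merge (sb.map (fun y => 2 * y)) (sa.map (fun x => 2 * x + 1))) k =
        min k sb.length + (if k ≤ sb.length then pvMatch sa (sb.drop k.toNat) else 0) := by
  induction sb with
  | nil =>
    intro sa k hk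
    simp only [List.map_nil, List.nil_merge, pvSweepP_all_odd, List.length_nil, List.drop_nil,
      pvMatch_nil]
    simp; omega
  | cons y ys ihb =>
    have hys : ys.Pairwise (· ≤ ·) := hb.tail
    have hyle : ∀ z ∈ ys, y ≤ z := fun z hz => (List.pairwise_cons.mp hb).1 z hz
    intro sa
    induction sa with
    | nil =>
      intro k hk
      rw [List.map_nil, List.merge_right, pvSweepP_all_even _ _ hk]
      split_ifs with h
      · rw [pvMatch_nil_left]; ring
      · ring
    | cons x xs iha =>
      intro k hk
      rw [List.map_cons, List.map_cons, List.cons_merge_cons]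
      by_cases hcmp : (2 * y : Int) ≤ 2 * x + 1
      · -- b-event first (y ≤ x)
        have hyx : y ≤ x := by omega
        rw [if_pos (by simpa using hcmp)]
        simp only [pvSweepP, pvMod_two_even]
        rw [if_neg (by norm_num)]
        by_cases hkpos : k > 0
        · -- avail > 0: consume one a, pair it with y
          rw [if_pos hkpos]
          rw [show ((2*x+1) : Int) :: List.map (fun x => 2*x+1) xs = List.map (fun x => (2*x+1 : Int)) (x :: xs) from rfl]
          rw [ihb hys (x :: xs) (k - 1) (by omega)]
          have hts : k.toNat = (k - 1).toNat + 1 := by omega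
          rw [hts, List.drop_succ_cons]
          simp only [List.length_cons]
          push_cast
          split_ifs with h1 h2 h2 <;> omega
        · -- avail = 0: the b-event is wasted; matches pvMatch's else-branch
          rw [if_neg hkpos]
          have hk0 : k = 0 := by omega
          subst hk0
          rw [show ((2*x+1) : Int) :: List.map (fun x => 2*x+1) xs = List.map (fun x => (2*x+1 : Int)) (x :: xs) from rfl]
          rw [ihb hys (x :: xs) 0 le_rfl]
          simp only [Int.toNat_zero, List.drop_zero, List.length_cons]
          push_cast
          rw [if_pos (by omega), if_pos (by omega)]
          simp only [pvMatch, if_neg (by omega : ¬ x < y)]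
          omega
      · -- a-event first (x < y)
        have hxy : x < y := by omega
        rw [if_neg (by simpa using hcmp)]
        simp only [pvSweepP, pvMod_two_odd, if_pos]
        rw [show ((2*y) : Int) :: List.map (fun y => 2*y) ys = List.map (fun y => (2*y : Int)) (y :: ys) from rfl]
        rw [iha (k + 1) (by omega)]
        by_cases h1 : k ≤ (ys.length : Int)
        · -- the (k+1)-th b exists; its value beats x
          have hts : (k + 1).toNat = k.toNat + 1 := by omega
          rw [hts, List.drop_succ_cons]
          have hklt : k.toNat < (y :: ys).length := by simp [List.length_cons]; omega
          have hdb : (y :: ys).drop k.toNat =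
              (y :: ys)[k.toNat]'hklt :: (y :: ys).drop (k.toNat + 1) :=
            List.drop_eq_getElem_cons hklt
          have hz : x < (y :: ys)[k.toNat]'hklt := by
            rcases Nat.eq_zero_or_pos k.toNat with h0 | h0
            · simp [h0]; omega
            · have : (y :: ys)[k.toNat]'hklt ∈ ys := by
                have : (y :: ys)[k.toNat]'hklt = ys[k.toNat - 1]'(by simp at hklt; omega) := by
                  rw [List.getElem_cons]; simp [Nat.pos_iff_ne_zero.mp h0]
                rw [this]; exact List.getElem_mem _
              exact lt_of_lt_of_le hxy (hyle _ this)
          rw [hdb, List.drop_succ_cons]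
          simp only [pvMatch, if_pos hz]
          simp only [List.length_cons]
          push_cast
          rw [if_pos (by omega), if_pos (by omega)]
          omega
        · -- k exhausts b entirely
          simp only [List.length_cons]
          push_cast
          rw [if_neg (by omega)]
          by_cases h2 : k ≤ (ys.length : Int) + 1
          · rw [if_pos h2]
            have : (y :: ys).drop k.toNat = [] :=
              List.drop_eq_nil_of_le (by simp [List.length_cons]; omega)
            rw [this, pvMatch_nil]
            omega
          · rw [if_neg h2]
            omega

theorem pvMain (a b : List Int) : findNumOfPairs a b = findNumOfPairs_alt a b := by
  unfold findNumOfPairs findNumOfPairs_alt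
  set sa := PySem.List.sorted a (fun x => x) with hsa
  set sb := PySem.List.sorted b (fun x => x) with hsb
  have ha : sa.Pairwise (· ≤ ·) := PySem.List.sorted_pairwise a (fun x => x)
  have hb : sb.Pairwise (· ≤ ·) := PySem.List.sorted_pairwise b (fun x => x)
  rw [pvLoopA_spec sa sb 0 0 0 (by omega)]
  simp only [List.drop_zero]
  rw [pvSorted_events_eq_merge sa sb ha hb, pvFoldl_sweep,
    pvSweep_merge sb hb sa 0 le_rfl]
  rw [if_pos (by positivity)]
  simp

-- ===== VERDICT (by name: the statement is the Claim_ definition above) =====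
theorem findNumOfPairs_spec : Claim_equal_findNumOfPairs := by
  intro a b _
  unfold Spec_findNumOfPairs
  exact pvMain a b
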